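-- pv_equiv track=rewrite | github.com/foreverxujiahuan/algorithm | 竞赛/A284/B.py | digArtifacts
-- ===== SOURCE A (Python) =====
-- from typing import List
--
-- def digArtifacts(n: int, artifacts: List[List[int]], dig: List[List[int]]) -> int:
--     res = 0
--     dig_set = set()
--     for d in dig:
--         dig_set.add((d[0], d[1]))
--     for artifact in artifacts:
--         points = set()
--         for i in range(artifact[0], artifact[2]+1):
--             for j in range(artifact[1], artifact[3]+1):
--                 points.add((i, j))
--         if points.issubset(dig_set):
--             res += 1
--     return res
-- ===== SOURCE B (Python) =====
-- def digArtifacts(n, artifacts, dig):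
--     dig_set = set()
--     for d in dig:
--         dig_set.add((d[0], d[1]))
--     res = 0
--     for a in artifacts:
--         r1, c1, r2, c2 = a[0], a[1], a[2], a[3]
--         area = max(0, r2 - r1 + 1) * max(0, c2 - c1 + 1)
--         cnt = 0
--         for (x, y) in dig_set:
--             if r1 <= x <= r2 and c1 <= y <= c2:
--                 cnt += 1
--         if cnt == area:
--             res += 1
--     return res
-- ===== Notes on version B (the rewrite author's own statement) =====
-- stated objective: faster
-- what changed: B never enumerates an artifact's cells: it compares the closed-form inclusive-rectangle area max(0,r2-r1+1)*max(0,c2-c1+1) with a count of distinct dig points falling inside the rectangle, instead of A's building a set of all rectangle cells and testing it for subset of the dig set.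
-- outside the precondition, e.g. on digArtifacts(0, [[1, 0, 0]], []): A returns 1, B raises IndexError
import Mathlib
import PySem

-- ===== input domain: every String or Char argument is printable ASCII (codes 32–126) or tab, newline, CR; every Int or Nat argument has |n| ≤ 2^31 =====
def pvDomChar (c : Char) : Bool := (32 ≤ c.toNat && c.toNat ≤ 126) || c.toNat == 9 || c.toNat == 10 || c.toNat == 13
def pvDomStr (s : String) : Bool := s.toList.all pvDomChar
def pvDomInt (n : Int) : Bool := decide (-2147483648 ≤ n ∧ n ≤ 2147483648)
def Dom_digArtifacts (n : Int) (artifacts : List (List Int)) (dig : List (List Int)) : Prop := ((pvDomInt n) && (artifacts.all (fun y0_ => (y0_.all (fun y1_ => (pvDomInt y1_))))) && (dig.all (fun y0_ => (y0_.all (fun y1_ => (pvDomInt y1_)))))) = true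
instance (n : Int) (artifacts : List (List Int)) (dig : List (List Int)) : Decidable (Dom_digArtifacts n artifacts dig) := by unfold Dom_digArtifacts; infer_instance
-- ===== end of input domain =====

-- B replaces A's per-artifact cell enumeration + subset test by a closed-form area
-- compared with a count of distinct dig points inside the rectangle (objective: alternative).

-- ===== PORT A =====
def digArtifacts (n : Int) (artifacts : List (List Int)) (dig : List (List Int)) : Int :=
  let dig_set : PySem.Set (Int × Int) :=
    dig.foldl (fun s d => PySem.Set.add s (PySem.List.pyGetD d 0 0, PySem.List.pyGetD d 1 0)) PySem.Set.empty
  artifacts.foldl (fun res artifact =>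
    let points : PySem.Set (Int × Int) :=
      (PySem.List.pyRange (PySem.List.pyGetD artifact 0 0) (PySem.List.pyGetD artifact 2 0 + 1) 1).foldl
        (fun p i =>
          (PySem.List.pyRange (PySem.List.pyGetD artifact 1 0) (PySem.List.pyGetD artifact 3 0 + 1) 1).foldl
            (fun p j => PySem.Set.add p (i, j)) p)
        PySem.Set.empty
    if PySem.Set.issubset points dig_set then res + 1 else res) 0

-- ===== PORT B =====
def digArtifacts_alt (n : Int) (artifacts : List (List Int)) (dig : List (List Int)) : Int :=
  let dig_set : PySem.Set (Int × Int) :=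
    dig.foldl (fun s d => PySem.Set.add s (PySem.List.pyGetD d 0 0, PySem.List.pyGetD d 1 0)) PySem.Set.empty
  artifacts.foldl (fun res a =>
    let r1 := PySem.List.pyGetD a 0 0
    let c1 := PySem.List.pyGetD a 1 0
    let r2 := PySem.List.pyGetD a 2 0
    let c2 := PySem.List.pyGetD a 3 0
    let area : Int := max 0 (r2 - r1 + 1) * max 0 (c2 - c1 + 1)
    -- the loop over dig_set only counts; the result is order-independent
    let cnt : Nat := dig_set.countP (fun p => decide (r1 ≤ p.1 ∧ p.1 ≤ r2 ∧ c1 ≤ p.2 ∧ p.2 ≤ c2))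
    if (cnt : Int) = area then res + 1 else res) 0

-- ===== PRECONDITION & SPEC =====
-- Pre_ excludes inputs with an artifact of fewer than 4 entries or a dig point of fewer
-- than 2 entries: there A raises IndexError, except that A accidentally returns on a short
-- artifact whose row range happens to be empty (artifact[1]/artifact[3] never indexed),
-- where B's natural four-way unpacking raises.
def Pre_digArtifacts (n : Int) (artifacts : List (List Int)) (dig : List (List Int)) : Prop :=
  (∀ a ∈ artifacts, 4 ≤ a.length) ∧ (∀ d ∈ dig, 2 ≤ d.length)
instance (n : Int) (artifacts : List (List Int)) (dig : List (List Int)) : Decidable (Pre_digArtifacts n artifacts dig) := by unfold Pre_digArtifacts; infer_instance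
def pvWitness_digArtifacts : Int × List (List Int) × List (List Int) := (1, [[0, 0, 0, 0]], [[0, 0]])

def Spec_digArtifacts (n : Int) (artifacts : List (List Int)) (dig : List (List Int)) (out : Int) : Prop := out = digArtifacts_alt n artifacts dig
instance (n : Int) (artifacts : List (List Int)) (dig : List (List Int)) (out : Int) : Decidable (Spec_digArtifacts n artifacts dig out) := by unfold Spec_digArtifacts; infer_instance

-- ===== CLAIM (what is proved, stated in full; the proofs are below) =====
def Claim_equal_digArtifacts : Prop := ∀ (n : Int) (artifacts : List (List Int)) (dig : List (List Int)), Dom_digArtifacts n artifacts dig → Pre_digArtifacts n artifacts dig → Spec_digArtifacts n artifacts dig (digArtifacts n artifacts dig)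

-- ===== LEMMAS AND PROOFS =====

-- membership in a fold of Set.add over a list
theorem mem_foldl_set_add {α β : Type} [BEq α] [LawfulBEq α]
    (l : List β) (g : β → α) (s : PySem.Set α) (z : α) :
    z ∈ l.foldl (fun s x => PySem.Set.add s (g x)) s ↔ z ∈ s ∨ ∃ x ∈ l, g x = z := by
  induction l generalizing s with
  | nil => simp
  | cons a t ih =>
    simp only [List.foldl_cons, ih, PySem.Set.mem_add]
    constructor
    · rintro ((h | h) | ⟨x, hx, rfl⟩)
      · exact Or.inl h
      · exact Or.inr ⟨a, by simp, h.symm⟩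
      · exact Or.inr ⟨x, by simp [hx], rfl⟩
    · rintro (h | ⟨x, hx, rfl⟩)
      · exact Or.inl (Or.inl h)
      · rcases List.mem_cons.mp hx with rfl | hx
        · exact Or.inl (Or.inr rfl)
        · exact Or.inr ⟨x, hx, rfl⟩

-- membership in A's per-artifact points set
theorem mem_points (r1 c1 r2 c2 : Int) (z : Int × Int) :
    z ∈ ((PySem.List.pyRange r1 (r2 + 1) 1).foldl
        (fun p i => (PySem.List.pyRange c1 (c2 + 1) 1).foldl (fun p j => PySem.Set.add p (i, j)) p)
        (PySem.Set.empty : PySem.Set (Int × Int))) ↔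
      r1 ≤ z.1 ∧ z.1 ≤ r2 ∧ c1 ≤ z.2 ∧ z.2 ≤ c2 := by
  have hrow : ∀ (rows : List Int) (p : PySem.Set (Int × Int)),
      z ∈ rows.foldl (fun p i => (PySem.List.pyRange c1 (c2 + 1) 1).foldl (fun p j => PySem.Set.add p (i, j)) p) p ↔
        z ∈ p ∨ ∃ i ∈ rows, ∃ j ∈ PySem.List.pyRange c1 (c2 + 1) 1, (i, j) = z := by
    intro rows
    induction rows with
    | nil => simp
    | cons a t ih =>
      intro p
      simp only [List.foldl_cons, ih, mem_foldl_set_add (g := fun j => (a, j))]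
      constructor
      · rintro ((h | ⟨j, hj, rfl⟩) | ⟨i, hi, j, hj, rfl⟩)
        · exact Or.inl h
        · exact Or.inr ⟨a, by simp, j, hj, rfl⟩
        · exact Or.inr ⟨i, by simp [hi], j, hj, rfl⟩
      · rintro (h | ⟨i, hi, j, hj, rfl⟩)
        · exact Or.inl (Or.inl h)
        · rcases List.mem_cons.mp hi with rfl | hi
          · exact Or.inl (Or.inr ⟨j, hj, rfl⟩)
          · exact Or.inr ⟨i, hi, j, hj, rfl⟩
  rw [hrow]
  simp only [PySem.Set.empty, List.not_mem_nil, false_or, PySem.List.mem_pyRange_one]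
  constructor
  · rintro ⟨i, ⟨h1, h2⟩, j, ⟨h3, h4⟩, rfl⟩
    exact ⟨h1, by omega, h3, by omega⟩
  · rintro ⟨h1, h2, h3, h4⟩
    exact ⟨z.1, ⟨h1, by omega⟩, z.2, ⟨h3, by omega⟩, by simp⟩

-- a set built by folding Set.add is Nodup
theorem nodup_foldl_set_add {α β : Type} [BEq α] [LawfulBEq α]
    (l : List β) (g : β → α) (s : PySem.Set α) (hs : s.Nodup) :
    (l.foldl (fun s x => PySem.Set.add s (g x)) s).Nodup := by
  induction l generalizing s with
  | nil => exact hs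
  | cons a t ih => exact ih _ (PySem.Set.nodup_add _ _ hs)

-- the key per-artifact equivalence: subset test ⇔ count equals closed-form area
theorem subset_iff_count (r1 c1 r2 c2 : Int) (S : PySem.Set (Int × Int)) (hS : S.Nodup) :
    PySem.Set.issubset
        ((PySem.List.pyRange r1 (r2 + 1) 1).foldl
          (fun p i => (PySem.List.pyRange c1 (c2 + 1) 1).foldl (fun p j => PySem.Set.add p (i, j)) p)
          (PySem.Set.empty : PySem.Set (Int × Int))) S = true ↔
      ((S.countP (fun p => decide (r1 ≤ p.1 ∧ p.1 ≤ r2 ∧ c1 ≤ p.2 ∧ p.2 ≤ c2)) : Int)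
        = max 0 (r2 - r1 + 1) * max 0 (c2 - c1 + 1)) := by
  classical
  set cells : Finset (Int × Int) := Finset.Icc r1 r2 ×ˢ Finset.Icc c1 c2 with hcells
  have hmemcells : ∀ z : Int × Int, z ∈ cells ↔ r1 ≤ z.1 ∧ z.1 ≤ r2 ∧ c1 ≤ z.2 ∧ z.2 ≤ c2 := by
    intro z
    simp [hcells, Finset.mem_product, Finset.mem_Icc, and_assoc]
  have hcard : (cells.card : Int) = max 0 (r2 - r1 + 1) * max 0 (c2 - c1 + 1) := by
    simp [hcells, Finset.card_product, Int.card_Icc]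
    congr 1 <;> omega
  rw [PySem.Set.issubset_iff]
  have hpts := mem_points r1 c1 r2 c2
  set pred : Int × Int → Bool := fun p => decide (r1 ≤ p.1 ∧ p.1 ≤ r2 ∧ c1 ≤ p.2 ∧ p.2 ≤ c2) with hpred
  have hcount : S.countP pred = (S.filter pred).length := List.countP_eq_length_filter
  have hnodupf : (S.filter pred).Nodup := hS.filter _
  have hcardf : (S.filter pred).toFinset.card = (S.filter pred).length :=
    List.toFinset_card_of_nodup hnodupf
  have hsubf : (S.filter pred).toFinset ⊆ cells := by
    intro z hz
    rw [List.mem_toFinset, List.mem_filter] at hz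
    have := hz.2
    rw [hpred] at this
    simp only [decide_eq_true_eq] at this
    exact (hmemcells z).mpr this
  constructor
  · intro h
    have hc2s : cells ⊆ (S.filter pred).toFinset := by
      intro z hz
      rw [List.mem_toFinset, List.mem_filter]
      refine ⟨h z ((hpts z).mpr ((hmemcells z).mp hz)), ?_⟩
      rw [hpred]
      simp only [decide_eq_true_eq]
      exact (hmemcells z).mp hz
    have heq : (S.filter pred).toFinset = cells := Finset.Subset.antisymm hsubf hc2s
    rw [hcount, ← hcardf, heq, hcard]
  · intro h x hx
    have hcardeq : (S.filter pred).toFinset.card = cells.card := by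
      have h1 : ((S.filter pred).length : Int) = (cells.card : Int) := by
        rw [← hcount, h, hcard]
      rw [hcardf]; exact_mod_cast h1
    have heq : (S.filter pred).toFinset = cells := Finset.eq_of_subset_of_card_le hsubf (le_of_eq hcardeq.symm)
    have hxc : x ∈ cells := (hmemcells x).mpr ((hpts x).mp hx)
    rw [← heq, List.mem_toFinset, List.mem_filter] at hxc
    exact hxc.1

theorem digArtifacts_eq_alt (n : Int) (artifacts dig : List (List Int)) :
    digArtifacts n artifacts dig = digArtifacts_alt n artifacts dig := by
  unfold digArtifacts digArtifacts_alt
  dsimp only []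
  have hS : (dig.foldl (fun s d => PySem.Set.add s (PySem.List.pyGetD d 0 0, PySem.List.pyGetD d 1 0))
      (PySem.Set.empty : PySem.Set (Int × Int))).Nodup :=
    nodup_foldl_set_add _ _ _ (by simp [PySem.Set.empty])
  apply PySem.List.foldl_congr_mem
  intro res a _
  rw [if_congr (Iff.trans (Iff.of_eq (by rfl)) (subset_iff_count _ _ _ _ _ hS)) rfl rfl]

-- ===== VERDICT (by name: the statement is the Claim_ definition above) =====
theorem digArtifacts_spec : Claim_equal_digArtifacts := by
  intro n artifacts dig _ _
  exact digArtifacts_eq_alt n artifacts dig
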